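-- pv_equiv track=rewrite | github.com/akikuno/cstag | src/cstag/to_vcf.py | find_ref_for_deletion
-- ===== SOURCE A (Python) =====
-- from collections import deque, defaultdict, Counter
--
-- def find_ref_for_deletion(cs_tag_split: list[str], idx: int) -> str:
--     ref = deque([cs_tag_split[idx][1:].upper()])
--     idx_ref = idx - 1
--     while idx_ref >= 0:
--         cs = cs_tag_split[idx_ref]
--         if cs.startswith("="):
--             ref.appendleft(cs[-1].upper())
--             break
--         if cs.startswith("*"):
--             ref.appendleft(cs[1].upper())
--             break
--         idx_ref -= 1
--     return "".join(ref)
-- ===== SOURCE B (Python) =====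
-- def find_ref_for_deletion(cs_tag_split: list[str], idx: int) -> str:
--     # forward pass: remember the index of the LAST preceding '='/'*' operation,
--     # then read the reference base off that single element
--     j = None
--     for i in range(idx):
--         c = cs_tag_split[i]
--         if c.startswith("=") or c.startswith("*"):
--             j = i
--     if j is None:
--         prefix = ""
--     else:
--         c = cs_tag_split[j]
--         prefix = c[-1].upper() if c.startswith("=") else c[1].upper()
--     return prefix + cs_tag_split[idx][1:].upper()
-- ===== Notes on version B (the rewrite author's own statement) =====
-- stated objective: alternative
-- what changed: Replaces A's backward break-out scan building a deque with a forward pass that only records the index of the last preceding '='/'*' element and computes the prefix once after the loop, concatenating plain strings.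
import Mathlib
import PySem

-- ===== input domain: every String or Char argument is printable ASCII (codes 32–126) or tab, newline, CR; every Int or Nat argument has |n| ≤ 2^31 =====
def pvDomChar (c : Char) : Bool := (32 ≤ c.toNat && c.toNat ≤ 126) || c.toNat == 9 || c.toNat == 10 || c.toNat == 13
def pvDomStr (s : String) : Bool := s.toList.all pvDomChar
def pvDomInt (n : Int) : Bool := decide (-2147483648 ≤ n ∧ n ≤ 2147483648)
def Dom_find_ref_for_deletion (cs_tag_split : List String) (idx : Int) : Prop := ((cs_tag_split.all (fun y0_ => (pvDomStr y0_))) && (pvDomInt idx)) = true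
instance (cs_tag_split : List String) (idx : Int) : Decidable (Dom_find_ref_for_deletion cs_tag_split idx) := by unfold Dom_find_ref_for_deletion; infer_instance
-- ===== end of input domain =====

-- B replaces A's backward break-out scan (deque) with a forward pass that records the index of the
-- last preceding '='/'*' element and computes the prefix once after the loop (alternative decomposition).


-- ===== PORT A =====
-- A's while loop: the argument k+1 means the current element is cs[k] (= idx_ref); the .getD
-- defaults are only reached where Python A raises, and Pre_ excludes exactly those inputs.
def pvALoop (cs : List String) : Nat → List Char → List Char
  | 0, acc => acc
  | k+1, acc =>
    let c := PySem.List.pyGetD cs (k : Int) ""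
    if PySem.Str.startswith c "=" then
      [PySem.Chars.upperChar ((PySem.Str.pyGet? c (-1)).getD ' ')] ++ acc
    else if PySem.Str.startswith c "*" then
      [PySem.Chars.upperChar ((PySem.Str.pyGet? c 1).getD ' ')] ++ acc
    else pvALoop cs k acc

def find_ref_for_deletion (cs_tag_split : List String) (idx : Int) : String :=
  String.ofList (pvALoop cs_tag_split idx.toNat
    (PySem.Chars.upper (PySem.List.slice ((PySem.List.pyGet? cs_tag_split idx).getD "").toList (some 1) none)))

-- ===== PORT B =====
-- Source B's forward pass: j = index of the last '='/'*' element before idx (None → none)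
def pvBLast (cs : List String) (idx : Int) : Option Int :=
  (PySem.List.pyRange 0 idx 1).foldl (fun j i =>
    let c := PySem.List.pyGetD cs i ""
    if PySem.Str.startswith c "=" || PySem.Str.startswith c "*" then some i else j) none

def find_ref_for_deletion_alt (cs_tag_split : List String) (idx : Int) : String :=
  String.ofList (
    (match pvBLast cs_tag_split idx with
     | none => []
     | some j =>
       let c := PySem.List.pyGetD cs_tag_split j ""
       if PySem.Str.startswith c "=" then [PySem.Chars.upperChar ((PySem.Str.pyGet? c (-1)).getD ' ')]
       else [PySem.Chars.upperChar ((PySem.Str.pyGet? c 1).getD ' ')]) ++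
    PySem.Chars.upper (PySem.List.slice ((PySem.List.pyGet? cs_tag_split idx).getD "").toList (some 1) none))

-- ===== PRECONDITION & SPEC =====
def pvIsMatch (c : String) : Bool := PySem.Str.startswith c "=" || PySem.Str.startswith c "*"

-- Pre_ excludes exactly the inputs where Python A raises: idx out of range (IndexError on
-- cs_tag_split[idx]), or the nearest preceding '='/'*' element is the one-character string "*"
-- (IndexError on cs[1]; Python B raises there too). A returns on every input Pre_ admits.
def Pre_find_ref_for_deletion (cs_tag_split : List String) (idx : Int) : Prop :=
  PySem.Raise.InRange cs_tag_split.length idx ∧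
  ∀ i : Nat, i < idx.toNat → cs_tag_split.getD i "" = "*" →
    ∃ j < idx.toNat, i < j ∧ pvIsMatch (cs_tag_split.getD j "") = true
instance (cs_tag_split : List String) (idx : Int) : Decidable (Pre_find_ref_for_deletion cs_tag_split idx) := by unfold Pre_find_ref_for_deletion; infer_instance

def pvWitness_find_ref_for_deletion : List String × Int := (["=a", "-gg", "*ac", "-del"], 3)

def Spec_find_ref_for_deletion (cs_tag_split : List String) (idx : Int) (out : String) : Prop := out = find_ref_for_deletion_alt cs_tag_split idx
instance (cs_tag_split : List String) (idx : Int) (out : String) : Decidable (Spec_find_ref_for_deletion cs_tag_split idx out) := by unfold Spec_find_ref_for_deletion; infer_instance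

-- ===== CLAIM (what is proved, stated in full; the proofs are below) =====
def Claim_equal_find_ref_for_deletion : Prop := ∀ (cs_tag_split : List String) (idx : Int), Dom_find_ref_for_deletion cs_tag_split idx → Pre_find_ref_for_deletion cs_tag_split idx → Spec_find_ref_for_deletion cs_tag_split idx (find_ref_for_deletion cs_tag_split idx)

-- ===== LEMMAS AND PROOFS =====

-- the index of the last '='/'*' element among cs[0..k)
def pvLast (cs : List String) : Nat → Option Nat
  | 0 => none
  | k+1 => if pvIsMatch (cs.getD k "") then some k else pvLast cs k

-- the one-character prefix read off that element
def pvPfx (cs : List String) : Option Nat → List Char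
  | none => []
  | some j =>
    let c := cs.getD j ""
    if PySem.Str.startswith c "=" then [PySem.Chars.upperChar ((PySem.Str.pyGet? c (-1)).getD ' ')]
    else [PySem.Chars.upperChar ((PySem.Str.pyGet? c 1).getD ' ')]

theorem pvALoop_eq (cs : List String) : ∀ (k : Nat) (acc : List Char),
    pvALoop cs k acc = pvPfx cs (pvLast cs k) ++ acc := by
  intro k
  induction k with
  | zero => intro acc; simp [pvALoop, pvLast, pvPfx]
  | succ k ih =>
    intro acc
    simp only [pvALoop, pvLast, PySem.List.pyGetD_natCast]
    by_cases h1 : PySem.Chars.startswith (cs[k]?.getD "").toList ['='] = true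
    · simp [h1, pvIsMatch, pvPfx]
    · by_cases h2 : PySem.Chars.startswith (cs[k]?.getD "").toList ['*'] = true
      · simp [h1, h2, pvIsMatch, pvPfx]
      · simp [h1, h2, pvIsMatch, ih]

theorem pvBLast_eq_nat (cs : List String) : ∀ (n : Nat),
    pvBLast cs (n : Int) = (pvLast cs n).map (fun j => (j : Int)) := by
  intro n
  induction n with
  | zero => simp [pvBLast, pvLast]
  | succ n ih =>
    have hsplit : PySem.List.pyRange 0 ((n : Int) + 1) 1 =
        PySem.List.pyRange 0 (n : Int) 1 ++ [(n : Int)] :=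
      PySem.List.pyRange_one_succ_right (a := 0) (b := (n : Int)) (by omega)
    simp only [pvBLast, pvLast, Nat.cast_add, Nat.cast_one, hsplit, List.foldl_append,
      List.foldl_cons, List.foldl_nil, PySem.List.pyGetD_natCast]
    simp only [pvBLast] at ih
    by_cases h1 : PySem.Chars.startswith (cs[n]?.getD "").toList ['='] = true
    · simp [h1, pvIsMatch]
    · by_cases h2 : PySem.Chars.startswith (cs[n]?.getD "").toList ['*'] = true
      · simp [h1, h2, pvIsMatch]
      · simp at ih
        simpa [h1, h2, pvIsMatch] using ih

theorem pvBLast_eq (cs : List String) (idx : Int) :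
    pvBLast cs idx = (pvLast cs idx.toNat).map (fun j => (j : Int)) := by
  by_cases h : idx ≤ 0
  · have h0 : idx.toNat = 0 := Int.toNat_of_nonpos h
    have hnil : PySem.List.pyRange 0 idx 1 = [] := PySem.List.pyRange_one_eq_nil h
    simp [pvBLast, hnil, h0, pvLast]
  · have hidx : idx = (idx.toNat : Int) := (Int.toNat_of_nonneg (by omega)).symm
    calc pvBLast cs idx = pvBLast cs (idx.toNat : Int) := by rw [← hidx]
      _ = (pvLast cs idx.toNat).map (fun j => (j : Int)) := pvBLast_eq_nat cs idx.toNat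

-- ===== VERDICT (by name: the statement is the Claim_ definition above) =====
theorem find_ref_for_deletion_spec : Claim_equal_find_ref_for_deletion := by
  intro cs idx _ _
  unfold Spec_find_ref_for_deletion find_ref_for_deletion find_ref_for_deletion_alt
  rw [pvALoop_eq, pvBLast_eq]
  cases pvLast cs idx.toNat with
  | none => simp [pvPfx]
  | some j => simp [pvPfx]
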